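-- pv_equiv track=rewrite | github.com/siiea-ai/PHI | phi/three.py | _menger_filled
-- ===== SOURCE A (Python) =====
-- def _menger_filled(ix: int, iy: int, iz: int, level: int) -> bool:
--     """True if integer cell (ix,iy,iz) is part of Menger sponge (not removed)."""
--     for _ in range(level):
--         cx = ix % 3
--         cy = iy % 3
--         cz = iz % 3
--         if (cx == 1) + (cy == 1) + (cz == 1) >= 2:
--             return False
--         ix //= 3
--         iy //= 3
--         iz //= 3
--     return True
-- ===== SOURCE B (Python) =====
-- def _menger_filled(ix: int, iy: int, iz: int, level: int) -> bool:
--     """True if integer cell (ix,iy,iz) is part of Menger sponge (not removed).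
--
--     Recursive decomposition over the fractal level: a cell is filled iff its
--     lowest base-3 digit triple is not removed and its parent cell at the next
--     coarser level is filled.  Under floor division by 3 every coordinate
--     converges to a fixed point in {-1, 0}, whose base-3 digit (0 or 2) is never
--     part of a removed triple, so the recursion can stop there early.
--     """
--     if level <= 0:
--         return True
--     if -1 <= ix <= 0 and -1 <= iy <= 0 and -1 <= iz <= 0:
--         return True
--     if (ix % 3 == 1) + (iy % 3 == 1) + (iz % 3 == 1) >= 2:
--         return False
--     return _menger_filled(ix // 3, iy // 3, iz // 3, level - 1)
-- ===== Notes on version B (the rewrite author's own statement) =====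
-- stated objective: alternative
-- what changed: Replaced the imperative loop that mutates ix/iy/iz over range(level) with a self-similar recursion on the level (base case level <= 0, recurse on the parent cell ix//3, iy//3, iz//3), short-circuiting to True once all coordinates reach their floor-division fixed point in {-1, 0}.
import Mathlib
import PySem

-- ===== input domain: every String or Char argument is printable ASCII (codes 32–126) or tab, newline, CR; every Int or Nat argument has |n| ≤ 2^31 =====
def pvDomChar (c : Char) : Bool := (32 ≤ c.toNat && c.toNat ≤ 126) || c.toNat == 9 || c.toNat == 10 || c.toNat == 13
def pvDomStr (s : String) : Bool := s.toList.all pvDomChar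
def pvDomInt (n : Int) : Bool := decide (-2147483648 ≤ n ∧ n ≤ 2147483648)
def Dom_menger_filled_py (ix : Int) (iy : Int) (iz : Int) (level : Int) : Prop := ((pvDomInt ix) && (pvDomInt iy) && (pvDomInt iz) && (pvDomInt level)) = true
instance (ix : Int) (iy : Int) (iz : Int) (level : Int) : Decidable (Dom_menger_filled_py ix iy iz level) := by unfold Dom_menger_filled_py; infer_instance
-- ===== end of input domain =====

-- B replaces A's imperative loop mutating ix/iy/iz with a self-similar recursion on the level
-- (base case level <= 0, recurse on the parent cell ix//3, iy//3, iz//3), short-circuiting to True once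
-- all coordinates reach their floor-division fixed point in {-1, 0}; different decomposition.

-- ===== PORT A =====
-- A's `for _ in range(level)` loop over the mutable state (ix, iy, iz), with early return False.
def mengerLoopA (ix : Int) (iy : Int) (iz : Int) : Nat → Bool
  | 0 => true
  | Nat.succ n =>
    let cx := PySem.Int.mod ix 3
    let cy := PySem.Int.mod iy 3
    let cz := PySem.Int.mod iz 3
    if (if cx = 1 then (1 : Nat) else 0) + (if cy = 1 then 1 else 0) + (if cz = 1 then 1 else 0) ≥ 2 then
      false
    else
      mengerLoopA (PySem.Int.floordiv ix 3) (PySem.Int.floordiv iy 3) (PySem.Int.floordiv iz 3) n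

def menger_filled_py (ix : Int) (iy : Int) (iz : Int) (level : Int) : Bool :=
  mengerLoopA ix iy iz level.toNat  -- range(level) runs max(level, 0) times

-- ===== PORT B =====
def menger_filled_py_alt (ix : Int) (iy : Int) (iz : Int) (level : Int) : Bool :=
  if level ≤ 0 then true
  else if -1 ≤ ix ∧ ix ≤ 0 ∧ -1 ≤ iy ∧ iy ≤ 0 ∧ -1 ≤ iz ∧ iz ≤ 0 then true
  else if (if PySem.Int.mod ix 3 = 1 then (1 : Nat) else 0) + (if PySem.Int.mod iy 3 = 1 then 1 else 0)
          + (if PySem.Int.mod iz 3 = 1 then 1 else 0) ≥ 2 then false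
  else menger_filled_py_alt (PySem.Int.floordiv ix 3) (PySem.Int.floordiv iy 3) (PySem.Int.floordiv iz 3) (level - 1)
termination_by level.toNat
decreasing_by omega

-- ===== PRECONDITION & SPEC =====
def Spec_menger_filled_py (ix : Int) (iy : Int) (iz : Int) (level : Int) (out : Bool) : Prop := out = menger_filled_py_alt ix iy iz level
instance (ix : Int) (iy : Int) (iz : Int) (level : Int) (out : Bool) : Decidable (Spec_menger_filled_py ix iy iz level out) := by unfold Spec_menger_filled_py; infer_instance

-- ===== CLAIM (what is proved, stated in full; the proofs are below) =====
def Claim_equal_menger_filled_py : Prop := ∀ (ix : Int) (iy : Int) (iz : Int) (level : Int), Dom_menger_filled_py ix iy iz level → Spec_menger_filled_py ix iy iz level (menger_filled_py ix iy iz level)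

-- ===== LEMMAS AND PROOFS =====

-- coordinates in {-1, 0} are fixed under // 3 and their digit (2 or 0) is never removed
theorem mengerLoopA_fixed (n : Nat) : ∀ (ix iy iz : Int),
    -1 ≤ ix → ix ≤ 0 → -1 ≤ iy → iy ≤ 0 → -1 ≤ iz → iz ≤ 0 →
    mengerLoopA ix iy iz n = true := by
  induction n with
  | zero => intro ix iy iz _ _ _ _ _ _; rfl
  | succ n ih =>
    intro ix iy iz h1 h2 h3 h4 h5 h6
    have dx : ix = -1 ∨ ix = 0 := by omega
    have dy : iy = -1 ∨ iy = 0 := by omega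
    have dz : iz = -1 ∨ iz = 0 := by omega
    rcases dx with rfl | rfl <;> rcases dy with rfl | rfl <;> rcases dz with rfl | rfl <;>
      simp [mengerLoopA, PySem.Int.mod, PySem.Int.floordiv] <;>
      exact ih _ _ _ (by omega) (by omega) (by omega) (by omega) (by omega) (by omega)

theorem mengerLoopA_eq_alt (n : Nat) : ∀ (ix iy iz : Int),
    mengerLoopA ix iy iz n = menger_filled_py_alt ix iy iz (n : Int) := by
  induction n with
  | zero =>
    intro ix iy iz
    rw [menger_filled_py_alt]
    simp [mengerLoopA]
  | succ n ih =>
    intro ix iy iz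
    rw [menger_filled_py_alt]
    have h0 : ¬ ((n + 1 : Nat) : Int) ≤ 0 := by omega
    have h1 : ((n + 1 : Nat) : Int) - 1 = (n : Int) := by omega
    by_cases hfix : -1 ≤ ix ∧ ix ≤ 0 ∧ -1 ≤ iy ∧ iy ≤ 0 ∧ -1 ≤ iz ∧ iz ≤ 0
    · rw [if_neg h0, if_pos hfix]
      exact mengerLoopA_fixed (n + 1) ix iy iz hfix.1 hfix.2.1 hfix.2.2.1 hfix.2.2.2.1
        hfix.2.2.2.2.1 hfix.2.2.2.2.2
    · simp only [mengerLoopA, h0, if_false, hfix, h1, ih]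

theorem menger_filled_py_spec' (ix iy iz level : Int) :
    menger_filled_py ix iy iz level = menger_filled_py_alt ix iy iz level := by
  by_cases h : level ≤ 0
  · have ht : level.toNat = 0 := by omega
    rw [menger_filled_py, ht, menger_filled_py_alt]
    simp [mengerLoopA, h]
  · have ht : ((level.toNat : Nat) : Int) = level := by omega
    rw [menger_filled_py, mengerLoopA_eq_alt, ht]

-- ===== VERDICT (by name: the statement is the Claim_ definition above) =====
theorem menger_filled_py_spec : Claim_equal_menger_filled_py := by
  intro ix iy iz level _
  exact menger_filled_py_spec' ix iy iz level
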